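-- pv_equiv track=rewrite | github.com/tomhyhan/PEuler | solved/clothes.py | solution
-- ===== SOURCE A (Python) =====
-- from collections import defaultdict
-- import copy
-- from functools import reduce
--
-- def solution(clothes):
--     memo = defaultdict(int)
--     for _, cate in clothes:
--         memo[cate] += 1
--     combs = list(memo.values())
--
--     powerset = [[]]
--     for num in combs:
--         n_powerset = len(powerset)
--         for i in range(n_powerset):
--             temp = copy.deepcopy(powerset[i])
--             temp.append(num)
--             powerset.append(temp)
--
--     total = 0
--     for pset in powerset:
--         if pset:
--             total += reduce(lambda x, y: x * y, pset)
--     return total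
-- ===== SOURCE B (Python) =====
-- def solution(clothes):
--     counts = {}
--     for _, cate in clothes:
--         counts[cate] = counts.get(cate, 0) + 1
--     prod = 1
--     for c in counts.values():
--         prod *= c + 1
--     return prod - 1
-- ===== Notes on version B (the rewrite author's own statement) =====
-- stated objective: faster
-- what changed: B replaces A's explicit powerset enumeration (build all 2^k subsets of the category counts, then sum their products) with the closed form: product of (count+1) over all categories, minus 1.
import Mathlib
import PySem

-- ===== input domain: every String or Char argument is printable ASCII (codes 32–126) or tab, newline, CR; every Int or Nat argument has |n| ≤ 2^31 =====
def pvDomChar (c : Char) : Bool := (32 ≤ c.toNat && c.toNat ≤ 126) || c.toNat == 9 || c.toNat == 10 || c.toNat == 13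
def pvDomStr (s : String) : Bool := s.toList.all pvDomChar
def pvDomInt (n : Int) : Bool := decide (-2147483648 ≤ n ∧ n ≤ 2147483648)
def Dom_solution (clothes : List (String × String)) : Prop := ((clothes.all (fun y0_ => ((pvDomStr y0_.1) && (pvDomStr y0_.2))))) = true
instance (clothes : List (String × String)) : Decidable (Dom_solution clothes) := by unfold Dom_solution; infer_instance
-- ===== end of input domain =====

-- B replaces A's powerset enumeration with the closed form Π(count+1) − 1 (objective: faster).

-- ===== PORT A =====
-- reduce(lambda x, y: x * y, pset) — A only calls it on nonempty pset (guarded by `if pset`)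
def pyReduceMul : List Int → Int
  | [] => 0
  | x :: xs => xs.foldl (· * ·) x

def solution (clothes : List (String × String)) : Int :=
  ((((clothes.foldl (fun (d : PySem.Dict String Int) p => d.modify p.2 0 (· + 1))
        PySem.Dict.empty).values).foldl
      (fun ps num => ps ++ ps.map (fun t => t ++ [num])) [[]]).foldl
    (fun total pset => if pset.isEmpty then total else total + pyReduceMul pset) 0)

-- ===== PORT B =====
def solution_alt (clothes : List (String × String)) : Int :=
  ((clothes.foldl (fun (d : PySem.Dict String Int) p => d.insert p.2 (d.getD p.2 0 + 1))
      PySem.Dict.empty).values).foldl (fun prod c => prod * (c + 1)) 1 - 1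

-- ===== PRECONDITION & SPEC =====
def Spec_solution (clothes : List (String × String)) (out : Int) : Prop := out = solution_alt clothes
instance (clothes : List (String × String)) (out : Int) : Decidable (Spec_solution clothes out) := by unfold Spec_solution; infer_instance

-- ===== CLAIM (what is proved, stated in full; the proofs are below) =====
def Claim_equal_solution : Prop := ∀ (clothes : List (String × String)), Dom_solution clothes → Spec_solution clothes (solution clothes)

-- ===== LEMMAS AND PROOFS =====

-- contribution of one subset to A's total: 0 for the empty subset, reduce(*, pset) otherwise
def psetTerm (p : List Int) : Int := if p.isEmpty then 0 else pyReduceMul p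

theorem pyReduceMul_cons (x : Int) (xs : List Int) : pyReduceMul (x :: xs) = (x :: xs).prod := by
  simp only [pyReduceMul, List.prod_cons]
  induction xs generalizing x with
  | nil => simp
  | cons y ys ih => simp only [List.foldl_cons, List.prod_cons, ih, mul_assoc]

theorem psetTerm_snoc (p : List Int) (n : Int) : psetTerm (p ++ [n]) = p.prod * n := by
  cases p with
  | nil => simp [psetTerm, pyReduceMul]
  | cons x xs =>
    simp [psetTerm, pyReduceMul_cons, List.prod_append]
    ring

-- A's guarded total loop is the sum of the psetTerm contributions
theorem foldl_total_eq_sum (ps : List (List Int)) (a : Int) :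
    ps.foldl (fun total pset => if pset.isEmpty then total else total + pyReduceMul pset) a
      = a + (ps.map psetTerm).sum := by
  induction ps generalizing a with
  | nil => simp
  | cons p ps ih =>
    rw [List.foldl_cons, List.map_cons, List.sum_cons]
    by_cases h : p.isEmpty
    · rw [if_pos h, ih]
      simp only [psetTerm, if_pos h]
      ring
    · rw [if_neg h, ih]
      simp only [psetTerm, if_neg h]
      ring

theorem sum_map_prod_snoc (ps : List (List Int)) (n : Int) :
    (ps.map (fun t => (t ++ [n]).prod)).sum = (ps.map List.prod).sum * n := by
  simp [List.prod_append, List.sum_map_mul_right]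

theorem sum_map_psetTerm_snoc (ps : List (List Int)) (n : Int) :
    (ps.map (fun t => psetTerm (t ++ [n]))).sum = (ps.map List.prod).sum * n := by
  simp only [psetTerm_snoc]
  exact List.sum_map_mul_right ps List.prod n

-- invariant of A's powerset-building fold: the guarded total
theorem total_invariant (combs : List Int) (ps : List (List Int)) :
    ((combs.foldl (fun ps num => ps ++ ps.map (fun t => t ++ [num])) ps).map psetTerm).sum
      = (ps.map psetTerm).sum + (ps.map List.prod).sum * ((combs.map (· + 1)).prod - 1) := by
  induction combs generalizing ps with
  | nil => simp
  | cons n rest ih =>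
    simp only [List.foldl_cons, ih, List.map_append, List.sum_append, List.map_map,
      Function.comp_def, sum_map_psetTerm_snoc, sum_map_prod_snoc, List.map_cons,
      List.prod_cons]
    ring

-- B's accumulator fold is the product of (c+1)
theorem foldl_mul_succ (l : List Int) (a : Int) :
    l.foldl (fun prod c => prod * (c + 1)) a = a * (l.map (· + 1)).prod := by
  induction l generalizing a with
  | nil => simp
  | cons c cs ih => simp [ih, mul_assoc]

-- ===== VERDICT (by name: the statement is the Claim_ definition above) =====
theorem solution_spec : Claim_equal_solution := by
  intro clothes _
  unfold Spec_solution solution solution_alt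
  have hA : clothes.foldl (fun (d : PySem.Dict String Int) p => d.modify p.2 0 (· + 1)) PySem.Dict.empty
      = PySem.Dict.counter (clothes.map (·.2)) := by
    rw [PySem.Dict.counter_eq_foldl, List.foldl_map]
  have hB : clothes.foldl (fun (d : PySem.Dict String Int) p => d.insert p.2 (d.getD p.2 0 + 1)) PySem.Dict.empty
      = PySem.Dict.counter (clothes.map (·.2)) := by
    rw [← PySem.Dict.foldl_insert_getD_add_one_eq_counter, List.foldl_map]
  rw [hA, hB, foldl_total_eq_sum, foldl_mul_succ,
    total_invariant (PySem.Dict.counter (clothes.map (·.2))).values [[]]]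
  simp [psetTerm]
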